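-- pv_equiv track=rewrite | github.com/GnaneswaranRD/dutools | utils.py | user_password_validation
-- ===== SOURCE A (Python) =====
-- def user_password_validation(password):
--     """
--     Password Validation
--
--     Developer : Gnaneswaran.R.D
--
--     """
--     if len(password) < 8:
--         return "The password must have more than 8 characters"
--
--     # Check for at least one uppercase letter
--     if not any(char.isupper() for char in password):
--         return "The password must contain at least one uppercase letter"
--
--     # Check for at least one lowercase letter
--     if not any(char.islower() for char in password):
--         return "The password must contain at least one lower letter"
--
--     # Check for at least one digit
--     if not any(char.isdigit() for char in password):
--         return "The password must contain at least one digit"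
--
--     # Check for at least one special character
--     special_characters = "!@#$%^&*()-_+=[]{}|:;<>,.?/~"
--     if not any(char in special_characters for char in password):
--         return "The password must contain at least one special character"
--
--     return True
-- ===== SOURCE B (Python) =====
-- def user_password_validation(password):
--     """Single-pass re-implementation: one loop sets four flags, then the checks run in order."""
--     if len(password) < 8:
--         return "The password must have more than 8 characters"
--     has_upper = has_lower = has_digit = has_special = False
--     special_characters = "!@#$%^&*()-_+=[]{}|:;<>,.?/~"
--     for char in password:
--         if char.isupper():
--             has_upper = True
--         elif char.islower():
--             has_lower = True
--         elif char.isdigit():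
--             has_digit = True
--         if char in special_characters:
--             has_special = True
--     if not has_upper:
--         return "The password must contain at least one uppercase letter"
--     if not has_lower:
--         return "The password must contain at least one lower letter"
--     if not has_digit:
--         return "The password must contain at least one digit"
--     if not has_special:
--         return "The password must contain at least one special character"
--     return True
-- ===== Notes on version B (the rewrite author's own statement) =====
-- stated objective: alternative
-- what changed: Replaces the four separate short-circuiting any() scans of the password with a single pass that precomputes four character-class flags, then tests the flags in the original order.
import Mathlib
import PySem

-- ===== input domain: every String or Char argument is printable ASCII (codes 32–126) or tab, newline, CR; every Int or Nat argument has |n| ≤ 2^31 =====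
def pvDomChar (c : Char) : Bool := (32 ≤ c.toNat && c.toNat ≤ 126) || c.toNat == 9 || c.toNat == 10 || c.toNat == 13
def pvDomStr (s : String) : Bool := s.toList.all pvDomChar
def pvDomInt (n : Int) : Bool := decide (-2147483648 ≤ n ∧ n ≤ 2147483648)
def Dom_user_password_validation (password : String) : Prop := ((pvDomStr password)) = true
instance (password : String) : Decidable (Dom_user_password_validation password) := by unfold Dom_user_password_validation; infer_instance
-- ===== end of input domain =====

-- B does one pass setting four flags instead of A's four any() scans; proved equal on all inputs.
-- On valid passwords Python returns the bool True (in both A and B alike); both ports represent it as "True".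
def pvSpecials : List Char := "!@#$%^&*()-_+=[]{}|:;<>,.?/~".toList

-- ===== PORT A =====
def user_password_validation (password : String) : String :=
  let cs := password.toList
  if cs.length < 8 then "The password must have more than 8 characters"
  else if ¬ cs.any PySem.Chars.isupper then "The password must contain at least one uppercase letter"
  else if ¬ cs.any PySem.Chars.islower then "The password must contain at least one lower letter"
  else if ¬ cs.any PySem.Chars.isdigit then "The password must contain at least one digit"
  else if ¬ cs.any (fun c => pvSpecials.contains c) then "The password must contain at least one special character"
  else "True"  -- Python returns the bool True here; represented as "True" in both ports

-- ===== PORT B =====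
def pvStep (st : Bool × Bool × Bool × Bool) (c : Char) : Bool × Bool × Bool × Bool :=
  let st :=
    if PySem.Chars.isupper c then (true, st.2)
    else if PySem.Chars.islower c then (st.1, true, st.2.2)
    else if PySem.Chars.isdigit c then (st.1, st.2.1, true, st.2.2.2)
    else st
  if pvSpecials.contains c then (st.1, st.2.1, st.2.2.1, true) else st

def user_password_validation_alt (password : String) : String :=
  let cs := password.toList
  if cs.length < 8 then "The password must have more than 8 characters"
  else
    let flags := cs.foldl pvStep (false, false, false, false)
    if ¬ flags.1 then "The password must contain at least one uppercase letter"
    else if ¬ flags.2.1 then "The password must contain at least one lower letter"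
    else if ¬ flags.2.2.1 then "The password must contain at least one digit"
    else if ¬ flags.2.2.2 then "The password must contain at least one special character"
    else "True"  -- Python returns the bool True here; represented as "True" in both ports

-- ===== PRECONDITION & SPEC =====
def Spec_user_password_validation (password : String) (out : String) : Prop := out = user_password_validation_alt password
instance (password : String) (out : String) : Decidable (Spec_user_password_validation password out) := by unfold Spec_user_password_validation; infer_instance

-- ===== CLAIM (what is proved, stated in full; the proofs are below) =====
def Claim_equal_user_password_validation : Prop := ∀ (password : String), Dom_user_password_validation password → Spec_user_password_validation password (user_password_validation password)

-- ===== LEMMAS AND PROOFS =====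

theorem pvStep_foldl (cs : List Char) (st : Bool × Bool × Bool × Bool) :
    cs.foldl pvStep st =
      (st.1 || cs.any PySem.Chars.isupper,
       st.2.1 || cs.any (fun c => !PySem.Chars.isupper c && PySem.Chars.islower c),
       st.2.2.1 || cs.any (fun c => !PySem.Chars.isupper c && !PySem.Chars.islower c && PySem.Chars.isdigit c),
       st.2.2.2 || cs.any (fun c => pvSpecials.contains c)) := by
  induction cs generalizing st with
  | nil => simp
  | cons c cs ih =>
    obtain ⟨a, b, d, e⟩ := st
    simp only [List.foldl_cons, List.any_cons, ih, pvStep]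
    by_cases h1 : PySem.Chars.isupper c <;>
      by_cases h2 : PySem.Chars.islower c <;>
        by_cases h3 : PySem.Chars.isdigit c <;>
          by_cases h4 : c ∈ pvSpecials <;>
            simp [h1, h2, h3, h4, List.contains_eq_mem]

theorem pv_low_not_up (c : Char) (h : PySem.Chars.islower c = true) : PySem.Chars.isupper c = false := by
  simp only [PySem.Chars.islower, PySem.Chars.isupper, Bool.and_eq_true, decide_eq_true_eq,
    Bool.and_eq_false_iff, decide_eq_false_iff_not] at *
  exact Or.inr fun h2 => absurd h.1 (not_le.mpr (lt_of_le_of_lt h2 (by decide)))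

theorem pv_dig_not_up (c : Char) (h : PySem.Chars.isdigit c = true) : PySem.Chars.isupper c = false := by
  simp only [PySem.Chars.isdigit, PySem.Chars.isupper, Bool.and_eq_true, decide_eq_true_eq,
    Bool.and_eq_false_iff, decide_eq_false_iff_not] at *
  exact Or.inl fun h2 => absurd h.2 (not_le.mpr (lt_of_lt_of_le (by decide) h2))

theorem pv_dig_not_low (c : Char) (h : PySem.Chars.isdigit c = true) : PySem.Chars.islower c = false := by
  simp only [PySem.Chars.isdigit, PySem.Chars.islower, Bool.and_eq_true, decide_eq_true_eq,
    Bool.and_eq_false_iff, decide_eq_false_iff_not] at *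
  exact Or.inl fun h2 => absurd h.2 (not_le.mpr (lt_of_lt_of_le (by decide) h2))

theorem pv_any_low (cs : List Char) :
    cs.any (fun c => !PySem.Chars.isupper c && PySem.Chars.islower c) = cs.any PySem.Chars.islower := by
  induction cs with
  | nil => rfl
  | cons c cs ih =>
    simp only [List.any_cons, ih]
    by_cases h : PySem.Chars.islower c
    · simp [h, pv_low_not_up c h]
    · simp [h]

theorem pv_any_dig (cs : List Char) :
    cs.any (fun c => !PySem.Chars.isupper c && !PySem.Chars.islower c && PySem.Chars.isdigit c) = cs.any PySem.Chars.isdigit := by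
  induction cs with
  | nil => rfl
  | cons c cs ih =>
    simp only [List.any_cons, ih]
    by_cases h : PySem.Chars.isdigit c
    · simp [h, pv_dig_not_up c h, pv_dig_not_low c h]
    · simp [h]

-- ===== VERDICT (by name: the statement is the Claim_ definition above) =====
theorem user_password_validation_spec : Claim_equal_user_password_validation := by
  intro password _
  unfold Spec_user_password_validation user_password_validation user_password_validation_alt
  simp only [pvStep_foldl, pv_any_low, pv_any_dig, Bool.false_or]
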